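-- pv_equiv track=rewrite | github.com/Tilapiatsu/blender-lineup_maker | OP_preset.py | get_parent_scene_path
-- ===== SOURCE A (Python) =====
-- def get_parent_scene_path(scene_path):
-- 	path = scene_path.split('.')[0:-1]
-- 	parent_scene_path = ''
-- 	for i,p in enumerate(path):
-- 		parent_scene_path += p
-- 		if i < len(path)-1:
-- 			parent_scene_path += '.'
--
-- 	return parent_scene_path
-- ===== SOURCE B (Python) =====
-- def get_parent_scene_path(scene_path):
-- 	# Everything before the last dot; empty when there is no dot.
-- 	return scene_path.rpartition('.')[0]
-- ===== Notes on version B (the rewrite author's own statement) =====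
-- stated objective: idiomatic
-- what changed: Replaces the split-into-components / drop-last / rejoin-with-dots accumulator loop by a single search for the last '.' (str.rpartition), returning the prefix before it or the empty string when there is no dot; no component list and no join loop are built.
import Mathlib
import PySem

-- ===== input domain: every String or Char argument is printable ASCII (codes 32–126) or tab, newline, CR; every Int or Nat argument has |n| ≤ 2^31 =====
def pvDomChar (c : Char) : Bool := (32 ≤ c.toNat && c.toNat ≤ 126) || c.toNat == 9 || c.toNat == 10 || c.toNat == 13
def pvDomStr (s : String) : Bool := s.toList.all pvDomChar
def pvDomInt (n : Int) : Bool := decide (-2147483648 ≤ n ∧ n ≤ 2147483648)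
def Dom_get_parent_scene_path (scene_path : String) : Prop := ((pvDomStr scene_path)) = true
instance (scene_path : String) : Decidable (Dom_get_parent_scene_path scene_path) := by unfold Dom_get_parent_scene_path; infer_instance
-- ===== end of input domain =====

-- B replaces A's split / drop-last / rejoin-with-dots loop by a single search for the
-- last '.' (rpartition), returning the prefix before it (empty when no dot is present); idiomatic.

-- ===== PORT A =====
-- path = scene_path.split('.')[0:-1]; then the enumerate loop joining with '.'
def get_parent_scene_path (scene_path : String) : String :=
  let path := PySem.List.slice (PySem.Chars.splitOn scene_path.toList ['.']) (some 0) (some (-1))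
  let out := (PySem.List.enumerate path 0).foldl
    (fun acc ip =>
      let acc := acc ++ ip.2
      if ip.1 < (path.length : Int) - 1 then acc ++ ['.'] else acc) []
  String.mk out

-- ===== PORT B =====
-- Hand port of scene_path.rpartition('.')[0] (PySem has no rpartition): the recursion
-- descends into the tail first, so the first dot it commits to is the LAST dot of the
-- string; `none` means "no dot", where rpartition yields an empty first component. Exact.
def pvBeforeLastDot : List Char → Option (List Char)
  | [] => none
  | c :: rest =>
    match pvBeforeLastDot rest with
    | some p => some (c :: p)
    | none => if c = '.' then some [] else none

def get_parent_scene_path_alt (scene_path : String) : String :=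
  match pvBeforeLastDot scene_path.toList with
  | some p => String.mk p
  | none => ""

-- ===== PRECONDITION & SPEC =====
def Spec_get_parent_scene_path (scene_path : String) (out : String) : Prop := out = get_parent_scene_path_alt scene_path
instance (scene_path : String) (out : String) : Decidable (Spec_get_parent_scene_path scene_path out) := by unfold Spec_get_parent_scene_path; infer_instance

-- ===== CLAIM (what is proved, stated in full; the proofs are below) =====
def Claim_equal_get_parent_scene_path : Prop := ∀ (scene_path : String), Dom_get_parent_scene_path scene_path → Spec_get_parent_scene_path scene_path (get_parent_scene_path scene_path)

-- ===== LEMMAS AND PROOFS =====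

-- structural characterisation of PySem.Chars.splitOn on separator ['.']
def pvSp : List Char → List (List Char)
  | [] => [[]]
  | c :: rest =>
    if c = '.' then [] :: pvSp rest
    else
      match pvSp rest with
      | [] => [[c]]
      | p :: ps => (c :: p) :: ps

def pvGlue (pre : List Char) : List (List Char) → List (List Char)
  | [] => [pre]
  | p :: ps => (pre ++ p) :: ps

-- the '.'-separated join of A's loop, all pieces but the last followed by '.'
def pvMj : List (List Char) → List Char
  | [] => []
  | [p] => p
  | p :: q :: ps => p ++ '.' :: pvMj (q :: ps)

theorem pvSp_ne_nil (l : List Char) : pvSp l ≠ [] := by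
  cases l with
  | nil => simp [pvSp]
  | cons c rest =>
    simp only [pvSp]
    split
    · simp
    · split <;> simp

theorem pvGo_eq (fuel : Nat) : ∀ (l cur : List Char) (accs : List (List Char)),
    l.length < fuel →
    PySem.Chars.splitOn.go ['.'] fuel l cur accs = accs.reverse ++ pvGlue cur.reverse (pvSp l) := by
  induction fuel with
  | zero => intro l cur accs h; omega
  | succ f ih =>
    intro l cur accs h
    cases l with
    | nil =>
      simp [PySem.Chars.splitOn.go, pvSp, pvGlue]
    | cons c rest =>
      by_cases hc : c = '.'
      · subst hc
        have hpre : List.isPrefixOf ['.'] ('.' :: rest) = true := by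
          simp [List.isPrefixOf]
        rw [show PySem.Chars.splitOn.go ['.'] (f+1) ('.' :: rest) cur accs
              = PySem.Chars.splitOn.go ['.'] f (List.drop (List.length ['.']) ('.'::rest)) [] (cur.reverse :: accs) by
              simp [PySem.Chars.splitOn.go, hpre]]
        simp only [List.length_cons, List.length_nil, List.drop_succ_cons, List.drop_zero]
        rw [ih rest [] (cur.reverse :: accs) (by simpa using Nat.lt_of_succ_lt_succ h)]
        obtain ⟨p, ps, hps⟩ : ∃ p ps, pvSp rest = p :: ps := by
          cases hsp : pvSp rest with
          | nil => exact absurd hsp (pvSp_ne_nil rest)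
          | cons p ps => exact ⟨p, ps, rfl⟩
        simp [pvSp, hps, pvGlue]
      · have hpre : List.isPrefixOf ['.'] (c :: rest) = false := by
          simp [List.isPrefixOf]
          exact fun h' => absurd h'.symm hc
        rw [show PySem.Chars.splitOn.go ['.'] (f+1) (c :: rest) cur accs
              = PySem.Chars.splitOn.go ['.'] f rest (c :: cur) accs by
              simp [PySem.Chars.splitOn.go, hpre]]
        rw [ih rest (c :: cur) accs (by simpa using Nat.lt_of_succ_lt_succ h)]
        cases hsp : pvSp rest with
        | nil => exact absurd hsp (pvSp_ne_nil rest)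
        | cons p ps => simp [pvSp, hc, hsp, pvGlue]

theorem pvSplitOn_eq (l : List Char) : PySem.Chars.splitOn l ['.'] = pvSp l := by
  rw [PySem.Chars.splitOn, pvGo_eq (l.length + 1) l [] [] (Nat.lt_succ_self _)]
  cases hsp : pvSp l with
  | nil => exact absurd hsp (pvSp_ne_nil l)
  | cons p ps => simp [pvGlue]

theorem pvSlice_dropLast (xs : List (List Char)) :
    PySem.List.slice xs (some 0) (some (-1)) = xs.dropLast := by
  simp [PySem.List.slice, List.dropLast_eq_take]

theorem pvFold_eq (n : Int) : ∀ (l : List (List Char)) (s : Int) (acc : List Char),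
    s + l.length = n →
    (PySem.List.enumerate l s).foldl
      (fun acc ip =>
        let acc := acc ++ ip.2
        if ip.1 < n - 1 then acc ++ ['.'] else acc) acc
    = acc ++ pvMj l := by
  intro l
  induction l with
  | nil => intro s acc _; simp [PySem.List.enumerate_nil, pvMj]
  | cons p tl ih =>
    intro s acc hs
    cases tl with
    | nil =>
      have : ¬ (s < n - 1) := by simp at hs; omega
      simp [PySem.List.enumerate_cons, PySem.List.enumerate_nil, this, pvMj]
    | cons q ps =>
      have hlt : s < n - 1 := by simp at hs; omega
      rw [PySem.List.enumerate_cons]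
      simp only [List.foldl_cons, hlt, if_pos]
      rw [ih (s + 1) (acc ++ p ++ ['.']) (by simp at hs ⊢; omega)]
      simp [pvMj]

theorem pvBld_none_iff (l : List Char) : pvBeforeLastDot l = none ↔ '.' ∉ l := by
  induction l with
  | nil => simp [pvBeforeLastDot]
  | cons c rest ih =>
    simp only [pvBeforeLastDot, List.mem_cons]
    cases hb : pvBeforeLastDot rest with
    | some p =>
      simp only []
      constructor
      · intro h; exact absurd h (by simp)
      · intro h; exact absurd (ih.mpr (fun hm => h (Or.inr hm))) (by simp [hb])
    | none =>
      have hnd : '.' ∉ rest := ih.mp hb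
      by_cases hc : c = '.' <;> simp [hc, hnd, eq_comm]

theorem pvSp_no_dot (l : List Char) (h : '.' ∉ l) : pvSp l = [l] := by
  induction l with
  | nil => rfl
  | cons c rest ih =>
    have hc : c ≠ '.' := fun hc => h (by simp [hc])
    have hr := ih (fun hm => h (List.mem_cons_of_mem _ hm))
    simp [pvSp, hc, hr]

theorem pvSp_dot (l : List Char) (h : '.' ∈ l) : 2 ≤ (pvSp l).length := by
  induction l with
  | nil => simp at h
  | cons c rest ih =>
    by_cases hc : c = '.'
    · have := pvSp_ne_nil rest
      simp [pvSp, hc]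
      cases hsp : pvSp rest with
      | nil => exact absurd hsp this
      | cons p ps => simp
    · have hr : '.' ∈ rest := by
        rcases List.mem_cons.mp h with h1 | h1
        · exact absurd h1.symm hc
        · exact h1
      have := ih hr
      cases hsp : pvSp rest with
      | nil => exact absurd hsp (pvSp_ne_nil rest)
      | cons p ps =>
        rw [hsp] at this
        simp [pvSp, hc, hsp]
        simpa using this

theorem pvMain (l : List Char) :
    (pvBeforeLastDot l).getD [] = pvMj (pvSp l).dropLast := by
  induction l with
  | nil => rfl
  | cons c rest ih =>
    by_cases hc : c = '.'
    · subst hc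
      cases hb : pvBeforeLastDot rest with
      | none =>
        have hnd : '.' ∉ rest := (pvBld_none_iff rest).mp hb
        simp [pvBeforeLastDot, hb, pvSp, pvSp_no_dot rest hnd, pvMj]
      | some p =>
        have hd : '.' ∈ rest := by
          by_contra hnd
          rw [(pvBld_none_iff rest).mpr hnd] at hb; exact absurd hb (by simp)
        have h2 := pvSp_dot rest hd
        obtain ⟨q, r, rs, hqr⟩ : ∃ q r rs, pvSp rest = q :: r :: rs := by
          cases h1 : pvSp rest with
          | nil => exact absurd h1 (pvSp_ne_nil rest)
          | cons q t =>
            cases t with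
            | nil => rw [h1] at h2; simp at h2
            | cons r rs => exact ⟨q, r, rs, rfl⟩
        rw [hb, hqr] at ih
        simp only [pvBeforeLastDot, hb, pvSp, reduceIte, hqr, Option.getD_some]
        rw [List.dropLast_cons_of_ne_nil (by simp), List.dropLast_cons_of_ne_nil (by simp)]
        rw [List.dropLast_cons_of_ne_nil (by simp)] at ih
        cases hdl : (r :: rs).dropLast with
        | nil =>
          rw [hdl] at ih
          simp only [pvMj, Option.getD_some] at ih ⊢
          simp [ih]
        | cons e es =>
          rw [hdl] at ih
          simp only [pvMj, Option.getD_some] at ih ⊢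
          simp [ih]
    · cases hb : pvBeforeLastDot rest with
      | none =>
        have hnd : '.' ∉ rest := (pvBld_none_iff rest).mp hb
        simp [pvBeforeLastDot, hb, hc, pvSp, pvSp_no_dot rest hnd, pvMj]
      | some p =>
        have hd : '.' ∈ rest := by
          by_contra hnd
          rw [(pvBld_none_iff rest).mpr hnd] at hb; exact absurd hb (by simp)
        have h2 := pvSp_dot rest hd
        obtain ⟨q, r, rs, hqr⟩ : ∃ q r rs, pvSp rest = q :: r :: rs := by
          cases h1 : pvSp rest with
          | nil => exact absurd h1 (pvSp_ne_nil rest)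
          | cons q t =>
            cases t with
            | nil => rw [h1] at h2; simp at h2
            | cons r rs => exact ⟨q, r, rs, rfl⟩
        rw [hb, hqr] at ih
        rw [List.dropLast_cons_of_ne_nil (by simp)] at ih
        simp only [pvBeforeLastDot, hb, Option.getD_some, pvSp, if_neg hc, hqr]
        rw [List.dropLast_cons_of_ne_nil (by simp)]
        cases hdl : (r :: rs).dropLast with
        | nil =>
          rw [hdl] at ih
          simp only [pvMj, Option.getD_some] at ih ⊢
          simp [ih]
        | cons e es =>
          rw [hdl] at ih
          simp only [pvMj, Option.getD_some] at ih ⊢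
          simp [ih]

-- ===== VERDICT (by name: the statement is the Claim_ definition above) =====
theorem get_parent_scene_path_spec : Claim_equal_get_parent_scene_path := by
  intro s _
  unfold Spec_get_parent_scene_path get_parent_scene_path get_parent_scene_path_alt
  simp only [pvSplitOn_eq, pvSlice_dropLast]
  rw [pvFold_eq ((((pvSp s.toList).dropLast).length : Int)) ((pvSp s.toList).dropLast) 0 []
      (by simp)]
  have := pvMain s.toList
  cases hb : pvBeforeLastDot s.toList with
  | none =>
    rw [hb] at this
    simp only [Option.getD_none] at this
    simp [← this]
    rfl
  | some p =>
    rw [hb] at this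
    simp only [Option.getD_some] at this
    simp [← this]
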